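-- pv_equiv track=rewrite | github.com/wwvmd/aoc24 | 2025/2025_day2.py | count_repeated_patterns
-- ===== SOURCE A (Python) =====
-- def count_repeated_patterns(n):
--     s = str(n)
--     length = len(s)
--
--     # Try all possible pattern lengths from 1 to length//2
--     for pattern_len in range(1, length // 2 + 1):
--         # Check if the string length is divisible by pattern length
--         if length % pattern_len == 0:
--             pattern = s[:pattern_len]
--             repeat_count = length // pattern_len
--
--             # Check if the pattern repeats throughout the entire string
--             if pattern * repeat_count == s and repeat_count >= 2:
--                 return repeat_count
--
--     return 0
-- ===== SOURCE B (Python) =====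
-- def count_repeated_patterns(n):
--     s = str(n)
--     p = (s + s).find(s, 1)
--     if p < len(s) and len(s) % p == 0:
--         return len(s) // p
--     return 0
-- ===== Notes on version B (the rewrite author's own statement) =====
-- stated objective: alternative
-- what changed: Replaced the loop that tries every candidate pattern length (building pattern*k and comparing) by the string-doubling trick: a single (s+s).find(s,1) yields the smallest period, from which the repeat count falls out arithmetically.
import Mathlib
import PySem

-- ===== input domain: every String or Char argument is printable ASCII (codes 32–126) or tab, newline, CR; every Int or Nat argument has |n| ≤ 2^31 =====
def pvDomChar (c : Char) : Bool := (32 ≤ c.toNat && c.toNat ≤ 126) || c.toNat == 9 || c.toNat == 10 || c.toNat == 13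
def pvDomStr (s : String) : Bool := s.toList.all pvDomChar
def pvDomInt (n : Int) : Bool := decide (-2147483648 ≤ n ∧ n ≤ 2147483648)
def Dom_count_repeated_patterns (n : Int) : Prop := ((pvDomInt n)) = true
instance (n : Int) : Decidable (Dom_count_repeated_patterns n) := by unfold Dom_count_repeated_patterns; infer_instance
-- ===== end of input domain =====

-- B replaces A's loop over all candidate pattern lengths by a single (s+s).find(s,1)
-- string-doubling search for the smallest period (alternative algorithm, same results).

-- ===== PORT A =====
-- Python's `pattern * repeat_count` (string repetition; a count ≤ 0 gives ""): exact.
def pvStrMul (cs : List Char) (k : Int) : List Char := (List.replicate k.toNat cs).flatten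

-- the `for pattern_len in range(...)` loop with its early `return repeat_count`
def pvLoopA (s : List Char) (length : Int) : List Int → Int
  | [] => 0
  | pattern_len :: rest =>
    if PySem.Int.mod length pattern_len = 0 then
      if pvStrMul (PySem.List.slice s none (some pattern_len)) (PySem.Int.floordiv length pattern_len) = s
           ∧ 2 ≤ PySem.Int.floordiv length pattern_len then
        PySem.Int.floordiv length pattern_len
      else pvLoopA s length rest
    else pvLoopA s length rest

def count_repeated_patterns (n : Int) : Int :=
  let s := PySem.Int.toChars n
  let length := PySem.List.len s
  pvLoopA s length (PySem.List.pyRange 1 (PySem.Int.floordiv length 2 + 1) 1)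

-- ===== PORT B =====
def count_repeated_patterns_alt (n : Int) : Int :=
  let s := PySem.Int.toChars n
  let p := PySem.Chars.findFrom (s ++ s) s 1
  if p < PySem.List.len s ∧ PySem.Int.mod (PySem.List.len s) p = 0 then
    PySem.Int.floordiv (PySem.List.len s) p
  else 0

-- ===== PRECONDITION & SPEC =====
def Spec_count_repeated_patterns (n : Int) (out : Int) : Prop := out = count_repeated_patterns_alt n
instance (n : Int) (out : Int) : Decidable (Spec_count_repeated_patterns n out) := by unfold Spec_count_repeated_patterns; infer_instance

-- ===== CLAIM (what is proved, stated in full; the proofs are below) =====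
def Claim_equal_count_repeated_patterns : Prop := ∀ (n : Int), Dom_count_repeated_patterns n → Spec_count_repeated_patterns n (count_repeated_patterns n)

-- ===== LEMMAS AND PROOFS =====

-- `pvP s q` : q is a "rotation period": rotating s left by q leaves it unchanged.
def pvP (s : List Char) (q : Nat) : Prop := s.drop q ++ s.take q = s

theorem pvP_iff_rotate {s : List Char} {q : Nat} (hq : q ≤ s.length) :
    pvP s q ↔ s.rotate q = s := by
  unfold pvP; rw [List.rotate_eq_drop_append_take hq]

theorem pv_rot_mul {s : List Char} {a : Nat} (ha : s.rotate a = s) (k : Nat) :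
    s.rotate (a * k) = s := by
  induction k with
  | zero => simp
  | succ k ih => rw [Nat.mul_succ, ← List.rotate_rotate, ih, ha]

theorem pv_rot_gcd {s : List Char} : ∀ a b : Nat, s.rotate a = s → s.rotate b = s →
    s.rotate (Nat.gcd a b) = s := by
  intro a
  induction a using Nat.strong_induction_on with
  | _ a ih =>
    intro b ha hb
    rcases Nat.eq_zero_or_pos a with rfl | hapos
    · simpa using hb
    rcases Nat.eq_zero_or_pos s.length with hL | hL
    · have : s = [] := List.eq_nil_of_length_eq_zero hL
      subst this; simp
    rw [Nat.gcd_rec]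
    have hba : b % a < a := Nat.mod_lt _ hapos
    apply ih _ hba _ _ ha
    -- show s.rotate (b % a) = s
    have hsn : s.rotate (a * (b / a)) = s := pv_rot_mul ha _
    have ht : (s.rotate (b % a)).rotate (a * (b / a)) = s := by
      rw [List.rotate_rotate]
      rw [Nat.mod_add_div b a, hb]
    have hLe : a * (b / a) ≤ s.length * (a * (b / a)) := Nat.le_mul_of_pos_left _ hL
    have hfix : s.rotate (s.length * (a * (b / a)) - a * (b / a)) = s := by
      have h1 : (s.rotate (a * (b / a))).rotate (s.length * (a * (b / a)) - a * (b / a))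
          = s.rotate (s.length * (a * (b / a))) := by
        rw [List.rotate_rotate]; congr 1; exact Nat.add_sub_cancel' hLe
      rw [hsn, List.rotate_length_mul] at h1
      exact h1
    calc s.rotate (b % a)
        = (s.rotate (b % a)).rotate ((s.rotate (b % a)).length * (a * (b / a))) := by
          rw [List.rotate_length_mul]
      _ = ((s.rotate (b % a)).rotate (a * (b / a))).rotate
            (s.length * (a * (b / a)) - a * (b / a)) := by
          conv_rhs => rw [List.rotate_rotate, Nat.add_sub_cancel' hLe]
          rw [List.length_rotate]
      _ = s := by rw [ht, hfix]

-- a rotation period gives the shift equation s[d:] = s[:len-d]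
theorem pv_shift_of_P {s : List Char} {d : Nat} (hP : pvP s d) :
    s.drop d = s.take (s.length - d) := by
  have h : (s.drop d ++ s.take d).take (s.length - d) = s.take (s.length - d) := by
    rw [hP]
  rw [List.take_append, List.length_drop, Nat.sub_self, List.take_zero, List.append_nil,
    List.take_of_length_le (by simp)] at h
  exact h

theorem pv_tile_of_shift {d : Nat} (hd : 0 < d) :
    ∀ (k : Nat) (s : List Char), s.length = k * d →
      s.drop d = s.take (s.length - d) →
      s = (List.replicate k (s.take d)).flatten := by
  intro k
  induction k with
  | zero =>
    intro s hlen _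
    simp [List.eq_nil_of_length_eq_zero (by omega : s.length = 0)]
  | succ k ih =>
    intro s hlen hshift
    have hLd : s.length - d = k * d := by rw [hlen]; rw [Nat.succ_mul]; omega
    have ht0 : s.drop d = s.take (k * d) := by rw [hshift, hLd]
    have htlen : (s.drop d).length = k * d := by simp [hlen, Nat.succ_mul]
    have htshift : (s.drop d).drop d = (s.drop d).take ((s.drop d).length - d) := by
      rw [htlen]
      conv_lhs => rw [ht0]
      rw [List.drop_take, ht0]
    have hIH := ih (s.drop d) htlen htshift
    have hfin : (List.replicate k ((s.drop d).take d)).flatten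
        = (List.replicate k (s.take d)).flatten := by
      rcases Nat.eq_zero_or_pos k with rfl | hk
      · simp
      · have : (s.drop d).take d = s.take d := by
          rw [ht0, List.take_take]
          congr 1
          exact Nat.min_eq_left (Nat.le_mul_of_pos_left d hk)
        rw [this]
    calc s = s.take d ++ s.drop d := (List.take_append_drop d s).symm
      _ = s.take d ++ (List.replicate k (s.take d)).flatten := by rw [hIH, hfin]
      _ = (List.replicate (k + 1) (s.take d)).flatten := by
          rw [List.replicate_succ, List.flatten_cons]

theorem pv_tile_of_P {s : List Char} {d : Nat} (hd : 0 < d) (hdvd : d ∣ s.length)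
    (hP : pvP s d) : (List.replicate (s.length / d) (s.take d)).flatten = s := by
  obtain ⟨k, hk⟩ := hdvd
  have hq : s.length / d = k := by rw [hk]; exact Nat.mul_div_cancel_left k hd
  rw [hq]
  exact (pv_tile_of_shift hd k s (by rw [hk, Nat.mul_comm]) (pv_shift_of_P hP)).symm

theorem pv_P_of_tile_aux (p : List Char) (k : Nat) :
    pvP ((List.replicate (k + 1) p).flatten) p.length := by
  unfold pvP
  conv_lhs => rw [List.replicate_succ, List.flatten_cons, List.drop_left, List.take_left]
  rw [List.replicate_succ', List.flatten_append, List.flatten_cons, List.flatten_nil,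
    List.append_nil]

theorem pv_P_of_tile {s : List Char} {d : Nat} (hd : 0 < d) (hdL : d ≤ s.length)
    (htile : (List.replicate (s.length / d) (s.take d)).flatten = s) : pvP s d := by
  have hplen : (s.take d).length = d := by simp [Nat.min_eq_left hdL]
  have hk : 1 ≤ s.length / d := (Nat.one_le_div_iff hd).mpr hdL
  obtain ⟨k, hk'⟩ : ∃ k, s.length / d = k + 1 := ⟨s.length / d - 1, by omega⟩
  rw [hk'] at htile
  have h := pv_P_of_tile_aux (s.take d) k
  rw [hplen, htile] at h
  exact h

-- prefix-occurrence in s++s at offset q ⇔ rotation period q  (q ≤ |s|)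
theorem pv_prefix_iff_P {s : List Char} {q : Nat} (hq : q ≤ s.length) :
    s <+: (s ++ s).drop q ↔ pvP s q := by
  rw [List.drop_append_of_le_length hq]
  unfold pvP
  constructor
  · intro h
    have h2 := List.prefix_iff_eq_take.mp h
    rw [List.take_append, List.length_drop,
      List.take_of_length_le (by simp), Nat.sub_sub_self hq] at h2
    exact h2.symm
  · intro h
    conv_lhs => rw [← h]
    exact (List.prefix_append_right_inj (s.drop q)).mpr (List.take_prefix q s)

-- A's loop = first element of the candidate list passing A's test
def pvCondA (s : List Char) (length : Int) (d : Int) : Bool :=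
  decide (PySem.Int.mod length d = 0
    ∧ pvStrMul (PySem.List.slice s none (some d)) (PySem.Int.floordiv length d) = s
    ∧ 2 ≤ PySem.Int.floordiv length d)

theorem pvLoopA_eq_find? (s : List Char) (length : Int) (lst : List Int) :
    pvLoopA s length lst =
      match lst.find? (pvCondA s length) with
      | some d => PySem.Int.floordiv length d
      | none => 0 := by
  induction lst with
  | nil => rfl
  | cons d rest ih =>
    by_cases h1 : PySem.Int.mod length d = 0
    · by_cases h2 : pvStrMul (PySem.List.slice s none (some d)) (PySem.Int.floordiv length d) = s
          ∧ 2 ≤ PySem.Int.floordiv length d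
      · have hc : pvCondA s length d = true := by
          simp only [pvCondA]; exact decide_eq_true ⟨h1, h2⟩
        rw [List.find?_cons_of_pos hc]
        unfold pvLoopA
        rw [if_pos h1, if_pos h2]
      · have hc : pvCondA s length d = false := by
          simp only [pvCondA]; exact decide_eq_false (by tauto)
        rw [List.find?_cons_of_neg (by simp [hc])]
        unfold pvLoopA
        rw [if_pos h1, if_neg h2]
        exact ih
    · have hc : pvCondA s length d = false := by
        simp only [pvCondA]; exact decide_eq_false (by tauto)
      rw [List.find?_cons_of_neg (by simp [hc])]
      unfold pvLoopA
      rw [if_neg h1]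
      exact ih

theorem pv_find?_pyRange_eq_some {cond : Int → Bool} {x b : Int}
    (hxb : x < b) (hx : cond x = true) :
    ∀ (n : Nat) (a : Int), (x - a).toNat = n → a ≤ x →
      (∀ q, a ≤ q → q < x → cond q = false) →
      (PySem.List.pyRange a b 1).find? cond = some x := by
  intro n
  induction n with
  | zero =>
    intro a hn ha _
    have : a = x := by omega
    subst this
    rw [PySem.List.pyRange_one_cons (by omega)]
    exact List.find?_cons_of_pos hx
  | succ n ih =>
    intro a hn ha hmin
    have hax : a < x := by omega
    rw [PySem.List.pyRange_one_cons (by omega)]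
    rw [List.find?_cons_of_neg (by simp [hmin a le_rfl hax])]
    exact ih (a + 1) (by omega) (by omega) (fun q hq hq' => hmin q (by omega) hq')

theorem pv_find?_pyRange_eq_none {cond : Int → Bool} {a b : Int}
    (h : ∀ q, a ≤ q → q < b → cond q = false) :
    (PySem.List.pyRange a b 1).find? cond = none := by
  rw [List.find?_eq_none]
  intro q hq
  rw [PySem.List.mem_pyRange_one] at hq
  simp [h q hq.1 hq.2]

-- pvCondA true forces a rotation period (with the divisor in range)
theorem pv_cond_to_P (s : List Char) (q : Int) (hq : 1 ≤ q)
    (hc : pvCondA s (↑s.length) q = true) : pvP s q.toNat ∧ q.toNat ≤ s.length := by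
  have hc' := of_decide_eq_true hc
  obtain ⟨hm, htl, h2⟩ := hc'
  have hq' : q = (q.toNat : Int) := (Int.toNat_of_nonneg (by omega)).symm
  rw [hq'] at hm htl h2
  rw [PySem.Int.mod_natCast] at hm
  have hmn : s.length % q.toNat = 0 := by exact_mod_cast hm
  rw [PySem.Int.floordiv_natCast] at htl h2
  have h2n : 2 ≤ s.length / q.toNat := by exact_mod_cast h2
  have hqL : q.toNat ≤ s.length := by
    by_contra hgt
    push_neg at hgt
    rw [Nat.div_eq_of_lt hgt] at h2n
    omega
  rw [PySem.List.slice_to_natCast] at htl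
  unfold pvStrMul at htl
  rw [Int.toNat_natCast] at htl
  exact ⟨pv_P_of_tile (by omega) hqL htl, hqL⟩

-- the central generic lemma: A's loop equals B's formula, for every character list
theorem pv_main (s : List Char) :
    pvLoopA s (PySem.List.len s) (PySem.List.pyRange 1 (PySem.Int.floordiv (PySem.List.len s) 2 + 1) 1)
    = (if PySem.Chars.findFrom (s ++ s) s 1 < PySem.List.len s
          ∧ PySem.Int.mod (PySem.List.len s) (PySem.Chars.findFrom (s ++ s) s 1) = 0
       then PySem.Int.floordiv (PySem.List.len s) (PySem.Chars.findFrom (s ++ s) s 1)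
       else 0) := by
  by_cases hnil : s = []
  · subst hnil; decide
  have hL1 : 0 < s.length := List.length_pos_of_ne_nil hnil
  -- evaluate the find in s ++ s from offset 1
  have hk2 : (1 : Nat) ≤ (s ++ s).length := by simp; omega
  have hff := PySem.Chars.findFrom_natCast (s ++ s) s 1 hk2
  have hinf : s <:+: (s ++ s).drop 1 := by
    rw [List.drop_append_of_le_length (by omega)]
    exact (List.suffix_append (s.drop 1) s).isInfix
  have hne : PySem.Chars.find ((s ++ s).drop 1) s ≠ -1 :=
    (PySem.Chars.find_ne_neg_one_iff _ _).mpr hinf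
  have hge : 0 ≤ PySem.Chars.find ((s ++ s).drop 1) s := by
    have := PySem.Chars.neg_one_le_find ((s ++ s).drop 1) s
    omega
  obtain ⟨hocc, hminf⟩ := PySem.Chars.find_spec hge
  set N := (PySem.Chars.find ((s ++ s).drop 1) s).toNat with hN
  have hffval : PySem.Chars.findFrom (s ++ s) s 1 = ((N + 1 : Nat) : Int) := by
    rw [show (1 : Int) = ((1 : Nat) : Int) by norm_num, hff, if_neg hne]
    push_cast
    omega
  -- p0 := N + 1 is the least rotation period ≥ 1
  have hdd : ∀ i : Nat, ((s ++ s).drop 1).drop i = (s ++ s).drop (i + 1) := by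
    intro i
    rw [List.drop_drop, Nat.add_comm]
  have hp0L : N + 1 ≤ s.length := by
    by_contra hgt
    push_neg at hgt
    have hlt : s.length - 1 < N := by omega
    apply hminf (s.length - 1) hlt
    rw [hdd, show (s.length - 1) + 1 = s.length by omega, List.drop_left]
  have hPp0 : pvP s (N + 1) := by
    have := hocc
    rw [hdd] at this
    exact (pv_prefix_iff_P hp0L).mp this
  have hminP : ∀ q : Nat, 1 ≤ q → q < N + 1 → ¬ pvP s q := by
    intro q h1 h2 hPq
    apply hminf (q - 1) (by omega)
    rw [hdd, show (q - 1) + 1 = q by omega]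
    exact (pv_prefix_iff_P (by omega)).mpr hPq
  -- rewrite A's loop as a first-match search
  simp only [PySem.List.len_eq]
  rw [pvLoopA_eq_find?, hffval]
  by_cases hcase : N + 1 < s.length
  · -- a proper period exists; it divides the length (gcd argument)
    have hrot : s.rotate (N + 1) = s := (pvP_iff_rotate hp0L).mp hPp0
    have hrotg : s.rotate (Nat.gcd (N + 1) s.length) = s :=
      pv_rot_gcd (N + 1) s.length hrot (List.rotate_length s)
    have hgpos : 0 < Nat.gcd (N + 1) s.length := Nat.gcd_pos_of_pos_left _ (by omega)
    have hgle : Nat.gcd (N + 1) s.length ≤ N + 1 := Nat.gcd_le_left _ (by omega)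
    have hgeq : Nat.gcd (N + 1) s.length = N + 1 := by
      by_contra hne'
      exact hminP _ hgpos (by omega)
        ((pvP_iff_rotate (by omega)).mpr hrotg)
    have hdvd : (N + 1) ∣ s.length := hgeq ▸ Nat.gcd_dvd_right (N + 1) s.length
    obtain ⟨k0, hk0⟩ := hdvd
    have hk02 : 2 ≤ k0 := by
      by_contra hlt
      have h01 : k0 = 0 ∨ k0 = 1 := by omega
      rcases h01 with rfl | rfl
      · rw [Nat.mul_zero] at hk0; omega
      · rw [Nat.mul_one] at hk0; omega
    have hdiv : s.length / (N + 1) = k0 := by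
      rw [hk0]
      exact Nat.mul_div_cancel_left k0 (by omega)
    have hhalf : N + 1 ≤ s.length / 2 := by
      rw [Nat.le_div_iff_mul_le (by omega)]
      have hmul : (N + 1) * 2 ≤ (N + 1) * k0 := Nat.mul_le_mul_left _ hk02
      omega
    have htile : (List.replicate (s.length / (N + 1)) (s.take (N + 1))).flatten = s :=
      pv_tile_of_P (by omega) ⟨k0, hk0⟩ hPp0
    -- A's search finds exactly N + 1
    have hfd : (PySem.List.pyRange 1 (PySem.Int.floordiv (↑s.length) 2 + 1) 1).find?
        (pvCondA s (↑s.length)) = some ((N + 1 : Nat) : Int) := by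
      apply pv_find?_pyRange_eq_some (n := N) (a := 1)
      · rw [PySem.Int.floordiv_eq_ediv_of_pos (by norm_num)]
        omega
      · apply decide_eq_true
        refine ⟨?_, ?_, ?_⟩
        · rw [PySem.Int.mod_natCast]
          have hm0 : s.length % (N + 1) = 0 := by rw [hk0]; exact Nat.mul_mod_right _ _
          exact_mod_cast hm0
        · rw [PySem.List.slice_to_natCast, PySem.Int.floordiv_natCast]
          unfold pvStrMul
          rw [Int.toNat_natCast, hdiv]
          rw [← hdiv]
          exact htile
        · rw [PySem.Int.floordiv_natCast, hdiv]
          exact_mod_cast hk02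
      · omega
      · omega
      · intro q hq1 hq2
        apply decide_eq_false
        intro hc
        have h := pv_cond_to_P s q hq1 (decide_eq_true hc)
        exact hminP q.toNat (by omega) (by omega) h.1
    rw [hfd]
    rw [if_pos]
    constructor
    · exact_mod_cast hcase
    · rw [PySem.Int.mod_natCast]
      have hm0 : s.length % (N + 1) = 0 := by rw [hk0]; exact Nat.mul_mod_right _ _
      exact_mod_cast hm0
  · -- no proper period: the loop finds nothing and B's guard fails
    have hfd : (PySem.List.pyRange 1 (PySem.Int.floordiv (↑s.length) 2 + 1) 1).find?
        (pvCondA s (↑s.length)) = none := by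
      apply pv_find?_pyRange_eq_none
      intro q hq1 hq2
      apply decide_eq_false
      intro hc
      have h := pv_cond_to_P s q hq1 (decide_eq_true hc)
      have hq2' : q.toNat < s.length := by
        rw [PySem.Int.floordiv_eq_ediv_of_pos (by norm_num)] at hq2
        omega
      exact hminP q.toNat (by omega) (by omega) h.1
    rw [hfd]
    rw [if_neg]
    intro ⟨h1, _⟩
    have : N + 1 < s.length := by exact_mod_cast h1
    omega

-- ===== VERDICT (by name: the statement is the Claim_ definition above) =====
theorem count_repeated_patterns_spec : Claim_equal_count_repeated_patterns := by
  intro n _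
  unfold Spec_count_repeated_patterns count_repeated_patterns count_repeated_patterns_alt
  exact pv_main (PySem.Int.toChars n)
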